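-- pv_equiv track=rewrite | github.com/fdehoti/CliqueCover_SATSolver | clique_cover_sat.py | complement_graph
-- ===== SOURCE A (Python) =====
-- def complement_graph(edges, n):
--     edge_set = {frozenset((u, v)) for (u, v) in edges}
--     comp = []
--     for u in range(1, n + 1):
--         for v in range(u + 1, n + 1):
--             if frozenset((u, v)) not in edge_set:
--                 comp.append((u, v))
--     return comp
-- ===== SOURCE B (Python) =====
-- def complement_graph(edges, n):
--     adj = {}
--     for (a, b) in edges:
--         adj.setdefault(a, set()).add(b)
--         adj.setdefault(b, set()).add(a)
--     comp = []
--     for u in range(1, n + 1):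
--         candidates = set(range(u + 1, n + 1)) - adj.get(u, set())
--         for v in sorted(candidates):
--             comp.append((u, v))
--     return comp
-- ===== Notes on version B (the rewrite author's own statement) =====
-- stated objective: alternative
-- what changed: Replaces the global frozenset edge-set probed once per vertex pair with a per-vertex adjacency index of neighbor sets; each row of the complement is emitted as a sorted set difference (range minus neighbors), so the per-pair frozenset construction and membership branch disappear.
import Mathlib
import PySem

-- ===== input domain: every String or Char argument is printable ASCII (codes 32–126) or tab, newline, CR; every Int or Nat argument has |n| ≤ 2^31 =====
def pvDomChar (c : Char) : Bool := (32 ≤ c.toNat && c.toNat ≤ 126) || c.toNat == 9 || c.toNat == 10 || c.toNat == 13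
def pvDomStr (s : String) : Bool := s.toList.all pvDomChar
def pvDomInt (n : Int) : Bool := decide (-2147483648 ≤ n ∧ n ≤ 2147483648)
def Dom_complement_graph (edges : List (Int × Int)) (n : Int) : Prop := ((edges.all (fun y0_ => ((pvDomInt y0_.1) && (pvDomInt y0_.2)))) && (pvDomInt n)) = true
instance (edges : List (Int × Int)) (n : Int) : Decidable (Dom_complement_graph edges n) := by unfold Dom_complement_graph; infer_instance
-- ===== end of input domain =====

-- B replaces the global frozenset edge-set probed once per vertex pair with a per-vertex
-- adjacency index; each complement row is a sorted set difference instead of a per-pair membership probe.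

-- ===== PORT A =====
-- frozenset((u,v)) of ints is represented exactly by the ordered pair (min u v, max u v)
-- (a faithful bijection between size-≤2 int frozensets and ordered pairs).
def complement_graph (edges : List (Int × Int)) (n : Int) : List (Int × Int) :=
  let edge_set : PySem.Set (Int × Int) :=
    PySem.Set.ofList (edges.map (fun p => (min p.1 p.2, max p.1 p.2)))
  (PySem.List.pyRange 1 (n + 1)).foldl (fun comp u =>
    (PySem.List.pyRange (u + 1) (n + 1)).foldl (fun comp v =>
      if !(edge_set.contains (min u v, max u v)) then comp ++ [(u, v)] else comp) comp) []

-- ===== PORT B =====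
-- adj.setdefault(a, set()).add(b); adj.setdefault(b, set()).add(a)  (one edge's two index updates)
def adjStep (d : PySem.Dict Int (PySem.Set Int)) (p : Int × Int) : PySem.Dict Int (PySem.Set Int) :=
  let d1 := d.insert p.1 (PySem.Set.add (d.getD p.1 PySem.Set.empty) p.2)
  d1.insert p.2 (PySem.Set.add (d1.getD p.2 PySem.Set.empty) p.1)

def complement_graph_alt (edges : List (Int × Int)) (n : Int) : List (Int × Int) :=
  let adj : PySem.Dict Int (PySem.Set Int) := edges.foldl adjStep PySem.Dict.empty
  (PySem.List.pyRange 1 (n + 1)).foldl (fun comp u =>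
    let candidates := PySem.Set.diff (PySem.Set.ofList (PySem.List.pyRange (u + 1) (n + 1)))
                                     (adj.getD u PySem.Set.empty)
    (PySem.List.sorted candidates (fun v => v)).foldl (fun comp v => comp ++ [(u, v)]) comp) []

-- ===== PRECONDITION & SPEC =====
def Spec_complement_graph (edges : List (Int × Int)) (n : Int) (out : List (Int × Int)) : Prop := out = complement_graph_alt edges n
instance (edges : List (Int × Int)) (n : Int) (out : List (Int × Int)) : Decidable (Spec_complement_graph edges n out) := by unfold Spec_complement_graph; infer_instance

-- ===== CLAIM (what is proved, stated in full; the proofs are below) =====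
def Claim_equal_complement_graph : Prop := ∀ (edges : List (Int × Int)) (n : Int), Dom_complement_graph edges n → Spec_complement_graph edges n (complement_graph edges n)

-- ===== LEMMAS AND PROOFS =====

-- one edge's effect on the adjacency index
lemma mem_adjStep (d : PySem.Dict Int (PySem.Set Int)) (e : Int × Int) (u v : Int) :
    v ∈ (adjStep d e).getD u PySem.Set.empty ↔
    v ∈ d.getD u PySem.Set.empty ∨ (e.1 = u ∧ e.2 = v) ∨ (e.2 = u ∧ e.1 = v) := by
  by_cases h1 : u = e.1 <;> by_cases h2 : u = e.2 <;> by_cases h3 : e.1 = e.2 <;>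
    simp [adjStep, PySem.Dict.getD_insert, PySem.Set.mem_add, h1, h2, h3, eq_comm]

-- membership in B's adjacency index, characterised over the edge list
lemma mem_adj_foldl (edges : List (Int × Int)) (d : PySem.Dict Int (PySem.Set Int)) (u v : Int) :
    v ∈ (edges.foldl adjStep d).getD u PySem.Set.empty ↔
    v ∈ d.getD u PySem.Set.empty ∨ ∃ p ∈ edges, (p.1 = u ∧ p.2 = v) ∨ (p.2 = u ∧ p.1 = v) := by
  induction edges generalizing d with
  | nil => simp
  | cons e t ih =>
    simp only [List.foldl_cons, ih, mem_adjStep, List.exists_mem_cons_iff]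
    exact or_assoc

-- for u < v, the normalised pair (min,max) of an edge equals (u,v) iff the edge is {u,v}
lemma norm_pair_eq (p : Int × Int) (u v : Int) (huv : u < v) :
    ((min p.1 p.2, max p.1 p.2) = (u, v)) ↔ ((p.1 = u ∧ p.2 = v) ∨ (p.2 = u ∧ p.1 = v)) := by
  simp only [Prod.ext_iff]
  omega

-- the per-row equality: B's sorted set difference is A's filtered inner scan
lemma row_eq (edges : List (Int × Int)) (u hi : Int) :
    PySem.List.sorted (PySem.Set.diff (PySem.Set.ofList (PySem.List.pyRange (u + 1) hi))
        ((edges.foldl adjStep PySem.Dict.empty).getD u PySem.Set.empty)) (fun v => v) =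
    (PySem.List.pyRange (u + 1) hi).filter (fun v =>
      !((PySem.Set.ofList (edges.map (fun p => (min p.1 p.2, max p.1 p.2)))).contains (min u v, max u v))) := by
  have hpair := PySem.List.pairwise_lt_pyRange_one (u + 1) hi
  rw [PySem.Set.ofList_eq_self_of_nodup _ hpair.nodup]
  show PySem.List.sorted (List.filter _ _) _ = _
  rw [PySem.List.sorted_eq_self_of_pairwise _ _
    ((hpair.sublist List.filter_sublist).imp le_of_lt)]
  apply List.filter_congr
  intro v hv
  have huv : u < v := by
    have := PySem.List.mem_pyRange_one.mp hv
    omega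
  rw [min_eq_left huv.le, max_eq_right huv.le]
  congr 1
  rw [Bool.eq_iff_iff]
  simp only [PySem.Set.contains, List.contains_iff_mem]
  rw [mem_adj_foldl, PySem.Set.mem_ofList, List.mem_map]
  simp only [PySem.Dict.getD_empty, PySem.Set.empty, List.not_mem_nil, false_or]
  constructor
  · rintro ⟨p, hp, hcase⟩
    exact ⟨p, hp, (norm_pair_eq p u v huv).mpr hcase⟩
  · rintro ⟨p, hp, heq⟩
    exact ⟨p, hp, (norm_pair_eq p u v huv).mp heq⟩

-- ===== VERDICT (by name: the statement is the Claim_ definition above) =====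
theorem complement_graph_spec : Claim_equal_complement_graph := by
  intro edges n _
  unfold Spec_complement_graph complement_graph complement_graph_alt
  apply PySem.List.foldl_congr_mem
  intro comp u _
  rw [PySem.List.foldl_append_if (f := fun v => (u, v)),
      PySem.List.foldl_append_singleton_eq_map (f := fun v => (u, v))]
  rw [row_eq]
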